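-- pv_equiv track=rewrite | github.com/neurhizome/terminal-art | tools/build_optimized_db.py | infer_styles_from_name
-- ===== SOURCE A (Python) =====
-- def infer_styles_from_name(name: str) -> set:
--     """Infer style tags from Unicode character name."""
--     name_upper = name.upper()
--     styles = set()
--
--     if "ARROW" in name_upper:
--         styles.add("arrow")
--     if "TRIANGLE" in name_upper:
--         styles.add("triangle")
--     if "BLOCK" in name_upper or "QUADRANT" in name_upper:
--         styles.add("block")
--     if "BOX" in name_upper or "LINE" in name_upper:
--         styles.add("line")
--         styles.add("connector")
--     if "CIRCLE" in name_upper or "CIRCLED" in name_upper: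
--         styles.add("circle")
--     if "SQUARE" in name_upper:
--         styles.add("square")
--     if "DIAMOND" in name_upper:
--         styles.add("diamond")
--     if "CURVED" in name_upper or "ARC" in name_upper or "ROUNDED" in name_upper:
--         styles.add("curved")
--         styles.add("organic")
--     if "DOUBLE" in name_upper:
--         styles.add("double")
--     if "DASHED" in name_upper or "DOTTED" in name_upper:
--         styles.add("dashed")
--     if any(x in name_upper for x in ["GEOMETRIC", "MATHEMATICAL"]):
--         styles.add("geometric")
--
--     return styles
-- ===== SOURCE B (Python) =====
-- # Keyword -> tags lookup table (A's rule order, so the style set is built in the same order).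
-- _TAGS = {
--     "ARROW": ("arrow",),
--     "TRIANGLE": ("triangle",),
--     "BLOCK": ("block",),
--     "QUADRANT": ("block",),
--     "BOX": ("line", "connector"),
--     "LINE": ("line", "connector"),
--     "CIRCLE": ("circle",),
--     "CIRCLED": ("circle",),
--     "SQUARE": ("square",),
--     "DIAMOND": ("diamond",),
--     "CURVED": ("curved", "organic"),
--     "ARC": ("curved", "organic"),
--     "ROUNDED": ("curved", "organic"),
--     "DOUBLE": ("double",),
--     "DASHED": ("dashed",),
--     "DOTTED": ("dashed",),
--     "GEOMETRIC": ("geometric",),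
--     "MATHEMATICAL": ("geometric",),
-- }
-- # The distinct keyword lengths: only windows of these widths can be keywords.
-- _LENS = (3, 4, 5, 6, 7, 8, 9, 12)
--
--
-- def infer_styles_from_name(name: str) -> set:
--     """Infer style tags from Unicode character name.
--
--     Dictionary-matching pass: slide a window over the name and hash-look-up
--     each window in the keyword table, instead of scanning the name once per
--     keyword. A window equal to a keyword is exactly an occurrence of it.
--     """
--     name_upper = name.upper()
--     found = set()
--     for i in range(len(name_upper)):
--         for length in _LENS:
--             window = name_upper[i:i + length]
--             if window in _TAGS:
--                 found.add(window)
--     styles = set()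
--     for keyword, tags in _TAGS.items():
--         if keyword in found:
--             styles.update(tags)
--     return styles
-- ===== Notes on version B (the rewrite author's own statement) =====
-- stated objective: alternative
-- what changed: Replaced per-keyword substring scans by a dictionary-matching pass: slide a window of each keyword length over the name once and hash-look-up every window in a keyword->tags table, then map the found keywords to tags in table order.
import Mathlib
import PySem

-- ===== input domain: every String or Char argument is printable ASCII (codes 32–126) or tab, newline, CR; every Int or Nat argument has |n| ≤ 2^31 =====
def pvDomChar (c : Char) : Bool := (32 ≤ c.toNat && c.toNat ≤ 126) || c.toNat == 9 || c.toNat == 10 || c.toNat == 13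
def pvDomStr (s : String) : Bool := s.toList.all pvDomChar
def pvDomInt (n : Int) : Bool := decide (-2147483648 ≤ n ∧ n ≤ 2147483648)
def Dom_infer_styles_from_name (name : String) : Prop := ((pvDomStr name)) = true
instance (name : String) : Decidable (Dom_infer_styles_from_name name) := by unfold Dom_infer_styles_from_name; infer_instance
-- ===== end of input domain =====

-- B replaces A's per-keyword substring scans by a dictionary-matching pass (window slices looked up
-- in a keyword→tags table, then found keywords mapped to tags); alternative decomposition, same cost.

-- ===== PORT A =====
def infer_styles_from_name (name : String) : List String :=
  let name_upper := PySem.Str.upper name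
  let styles : PySem.Set String := PySem.Set.empty
  let styles := if PySem.Str.isIn "ARROW" name_upper then PySem.Set.add styles "arrow" else styles
  let styles := if PySem.Str.isIn "TRIANGLE" name_upper then PySem.Set.add styles "triangle" else styles
  let styles := if PySem.Str.isIn "BLOCK" name_upper || PySem.Str.isIn "QUADRANT" name_upper then PySem.Set.add styles "block" else styles
  let styles := if PySem.Str.isIn "BOX" name_upper || PySem.Str.isIn "LINE" name_upper then
      PySem.Set.add (PySem.Set.add styles "line") "connector" else styles
  let styles := if PySem.Str.isIn "CIRCLE" name_upper || PySem.Str.isIn "CIRCLED" name_upper then PySem.Set.add styles "circle" else styles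
  let styles := if PySem.Str.isIn "SQUARE" name_upper then PySem.Set.add styles "square" else styles
  let styles := if PySem.Str.isIn "DIAMOND" name_upper then PySem.Set.add styles "diamond" else styles
  let styles := if PySem.Str.isIn "CURVED" name_upper || PySem.Str.isIn "ARC" name_upper || PySem.Str.isIn "ROUNDED" name_upper then
      PySem.Set.add (PySem.Set.add styles "curved") "organic" else styles
  let styles := if PySem.Str.isIn "DOUBLE" name_upper then PySem.Set.add styles "double" else styles
  let styles := if PySem.Str.isIn "DASHED" name_upper || PySem.Str.isIn "DOTTED" name_upper then PySem.Set.add styles "dashed" else styles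
  let styles := if ["GEOMETRIC", "MATHEMATICAL"].any (fun x => PySem.Str.isIn x name_upper) then PySem.Set.add styles "geometric" else styles
  styles

-- ===== PORT B =====
-- the keyword → tags table (_TAGS in Source B)
def pvTags : PySem.Dict String (List String) :=
  PySem.Dict.ofList
    [("ARROW", ["arrow"]), ("TRIANGLE", ["triangle"]),
     ("BLOCK", ["block"]), ("QUADRANT", ["block"]),
     ("BOX", ["line", "connector"]), ("LINE", ["line", "connector"]),
     ("CIRCLE", ["circle"]), ("CIRCLED", ["circle"]),
     ("SQUARE", ["square"]), ("DIAMOND", ["diamond"]),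
     ("CURVED", ["curved", "organic"]), ("ARC", ["curved", "organic"]), ("ROUNDED", ["curved", "organic"]),
     ("DOUBLE", ["double"]), ("DASHED", ["dashed"]), ("DOTTED", ["dashed"]),
     ("GEOMETRIC", ["geometric"]), ("MATHEMATICAL", ["geometric"])]

-- the distinct keyword lengths (_LENS in Source B)
def pvLens : List Int := [3, 4, 5, 6, 7, 8, 9, 12]

-- the window-scanning loop of Source B: every window that is a key of the table is collected
def pvFound (name_upper : String) : PySem.Set String :=
  (PySem.List.pyRange 0 (PySem.Str.len name_upper) 1).foldl
    (fun found i =>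
      pvLens.foldl
        (fun found length =>
          let window := PySem.Str.slice name_upper (some i) (some (i + length))
          if pvTags.contains window then PySem.Set.add found window else found)
        found)
    PySem.Set.empty

def infer_styles_from_name_alt (name : String) : List String :=
  let name_upper := PySem.Str.upper name
  let found := pvFound name_upper
  pvTags.items.foldl
    (fun styles kt => if PySem.Set.contains found kt.1 then PySem.Set.update styles kt.2 else styles)
    PySem.Set.empty

-- ===== PRECONDITION & SPEC =====
def Spec_infer_styles_from_name (name : String) (out : List String) : Prop := out = infer_styles_from_name_alt name
instance (name : String) (out : List String) : Decidable (Spec_infer_styles_from_name name out) := by unfold Spec_infer_styles_from_name; infer_instance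

-- ===== CLAIM (what is proved, stated in full; the proofs are below) =====
def Claim_equal_infer_styles_from_name : Prop := ∀ (name : String), Dom_infer_styles_from_name name → Spec_infer_styles_from_name name (infer_styles_from_name name)

-- ===== LEMMAS AND PROOFS =====

-- membership in a fold whose step only ever adds elements described by P
theorem pv_mem_foldl {α ι : Type} (step : PySem.Set α → ι → PySem.Set α) (P : ι → α → Prop)
    (h : ∀ s i x, x ∈ step s i ↔ x ∈ s ∨ P i x) (l : List ι) (s0 : PySem.Set α) (x : α) :
    x ∈ l.foldl step s0 ↔ x ∈ s0 ∨ ∃ i ∈ l, P i x := by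
  induction l generalizing s0 with
  | nil => simp
  | cons a t ih =>
    rw [List.foldl_cons, ih, h]
    simp only [List.mem_cons, exists_eq_or_imp]
    tauto

-- membership in the set built by pvFound
theorem pv_mem_pvFound (u x : String) :
    x ∈ pvFound u ↔ ∃ i : Int, (0 ≤ i ∧ i < PySem.Str.len u) ∧ ∃ L ∈ pvLens,
      pvTags.contains (PySem.Str.slice u (some i) (some (i + L))) = true ∧
      PySem.Str.slice u (some i) (some (i + L)) = x := by
  unfold pvFound
  rw [pv_mem_foldl _
    (fun i x => ∃ L ∈ pvLens,
      pvTags.contains (PySem.Str.slice u (some i) (some (i + L))) = true ∧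
      PySem.Str.slice u (some i) (some (i + L)) = x)
    (fun s i x => by
      rw [pv_mem_foldl _
        (fun L x => pvTags.contains (PySem.Str.slice u (some i) (some (i + L))) = true ∧
          PySem.Str.slice u (some i) (some (i + L)) = x)
        (fun s L x => by
          simp only []
          split
          · rw [PySem.Set.mem_add]
            constructor
            · rintro (hs | rfl)
              · exact Or.inl hs
              · exact Or.inr ⟨by assumption, rfl⟩
            · rintro (hs | ⟨-, rfl⟩)
              · exact Or.inl hs
              · exact Or.inr rfl
          · constructor
            · exact Or.inl
            · rintro (hs | ⟨hc, rfl⟩)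
              · exact hs
              · exact absurd hc (by simp_all))])]
  simp only [PySem.Set.empty, List.not_mem_nil, false_or, PySem.List.mem_pyRange_one]

-- for a table keyword, being found is exactly being a substring of the (upper-cased) name
theorem pv_found_key (u k : String) (hk : pvTags.contains k = true)
    (hne : k.toList ≠ []) (hlen : ((k.toList.length : Int)) ∈ pvLens) :
    PySem.Set.contains (pvFound u) k = PySem.Str.isIn k u := by
  rw [Bool.eq_iff_iff]
  have hmem : PySem.Set.contains (pvFound u) k = true ↔ k ∈ pvFound u := by
    simp [PySem.Set.contains]
  rw [hmem, pv_mem_pvFound, PySem.Str.isIn_eq, PySem.Chars.isIn_iff_infix]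
  constructor
  · rintro ⟨i, ⟨hi0, -⟩, L, hL, -, hslice⟩
    have hLpos : 0 < L := by
      simp only [pvLens, List.mem_cons, List.not_mem_nil, or_false] at hL
      omega
    have : k.toList = List.take ((i + L).toNat - i.toNat) (List.drop i.toNat u.toList) := by
      rw [← hslice, PySem.Str.toList_slice, PySem.Chars.slice_eq_listSlice,
        PySem.List.slice_toNat (ha := hi0) (hb := by omega)]
    rw [this]
    exact (List.take_prefix _ _).isInfix.trans (List.drop_suffix _ _).isInfix
  · rintro ⟨pfx, sfx, heq⟩
    have hwin : PySem.Str.slice u (some (pfx.length : Int))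
        (some ((pfx.length : Int) + (k.toList.length : Int))) = k := by
      apply String.toList_inj.mp
      rw [PySem.Str.toList_slice, PySem.Chars.slice_eq_listSlice,
        PySem.List.slice_natCast_add, ← heq]
      simp
    refine ⟨(pfx.length : Int), ⟨by positivity, ?_⟩, (k.toList.length : Int), hlen, ?_, ?_⟩
    · rw [PySem.Str.len_eq, ← heq]
      simp only [List.length_append]
      have : 0 < k.toList.length := List.length_pos_of_ne_nil hne
      push_cast
      omega
    · rw [hwin]; exact hk
    · rw [hwin]

-- adding an element already present is the identity
theorem pv_add_eq_of_mem (s : PySem.Set String) (x : String) (h : x ∈ s) :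
    PySem.Set.add s x = s := by
  simp [PySem.Set.add, PySem.Set.contains, h]

-- membership in Set.update
theorem pv_mem_update (s : PySem.Set String) (T : List String) (x : String) :
    x ∈ PySem.Set.update s T ↔ x ∈ s ∨ x ∈ T := by
  induction T generalizing s with
  | nil => simp [PySem.Set.update]
  | cons t T ih =>
    have h : PySem.Set.update s (t :: T) = PySem.Set.update (PySem.Set.add s t) T := rfl
    rw [h, ih]
    simp [PySem.Set.mem_add]
    tauto

-- updating by elements already present is the identity
theorem pv_update_eq_of_mem (s : PySem.Set String) (T : List String) (h : ∀ x ∈ T, x ∈ s) :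
    PySem.Set.update s T = s := by
  induction T generalizing s with
  | nil => rfl
  | cons t T ih =>
    have h0 : PySem.Set.update s (t :: T) = PySem.Set.update (PySem.Set.add s t) T := rfl
    rw [h0, pv_add_eq_of_mem s t (h t (by simp))]
    exact ih s (fun x hx => h x (by simp [hx]))

-- Set.update is idempotent
theorem pv_update_idem (s : PySem.Set String) (T : List String) :
    PySem.Set.update (PySem.Set.update s T) T = PySem.Set.update s T :=
  pv_update_eq_of_mem _ _ (fun x hx => (pv_mem_update _ _ _).mpr (Or.inr hx))

-- fusing 2 (resp. 3) conditional updates with the same tag list into one disjunctive update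
theorem pv_if2 (c1 c2 : Bool) (s : PySem.Set String) (T : List String) :
    (if c2 then PySem.Set.update (if c1 then PySem.Set.update s T else s) T
     else (if c1 then PySem.Set.update s T else s)) =
      if c1 || c2 then PySem.Set.update s T else s := by
  cases c1 <;> cases c2 <;> simp [pv_update_idem]

theorem pv_if3 (c1 c2 c3 : Bool) (s : PySem.Set String) (T : List String) :
    (if c3 then PySem.Set.update
        (if c2 then PySem.Set.update (if c1 then PySem.Set.update s T else s) T
         else (if c1 then PySem.Set.update s T else s)) T
     else (if c2 then PySem.Set.update (if c1 then PySem.Set.update s T else s) T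
           else (if c1 then PySem.Set.update s T else s))) =
      if c1 || c2 || c3 then PySem.Set.update s T else s := by
  cases c1 <;> cases c2 <;> cases c3 <;> simp [pv_update_idem]

-- consuming one / two / three leading table rules of the output loop
theorem pv_group1 (found : PySem.Set String) (k1 : String) (T : List String)
    (rest : List (String × List String)) (s : PySem.Set String) :
    List.foldl (fun styles kt => if PySem.Set.contains found kt.1 then PySem.Set.update styles kt.2 else styles)
        s ((k1, T) :: rest) =
      List.foldl (fun styles kt => if PySem.Set.contains found kt.1 then PySem.Set.update styles kt.2 else styles)
        (if PySem.Set.contains found k1 then PySem.Set.update s T else s) rest := by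
  simp only [List.foldl_cons]

theorem pv_group2 (found : PySem.Set String) (k1 k2 : String) (T : List String)
    (rest : List (String × List String)) (s : PySem.Set String) :
    List.foldl (fun styles kt => if PySem.Set.contains found kt.1 then PySem.Set.update styles kt.2 else styles)
        s ((k1, T) :: (k2, T) :: rest) =
      List.foldl (fun styles kt => if PySem.Set.contains found kt.1 then PySem.Set.update styles kt.2 else styles)
        (if PySem.Set.contains found k1 || PySem.Set.contains found k2 then PySem.Set.update s T else s) rest := by
  simp only [List.foldl_cons]
  rw [pv_if2]

theorem pv_group3 (found : PySem.Set String) (k1 k2 k3 : String) (T : List String)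
    (rest : List (String × List String)) (s : PySem.Set String) :
    List.foldl (fun styles kt => if PySem.Set.contains found kt.1 then PySem.Set.update styles kt.2 else styles)
        s ((k1, T) :: (k2, T) :: (k3, T) :: rest) =
      List.foldl (fun styles kt => if PySem.Set.contains found kt.1 then PySem.Set.update styles kt.2 else styles)
        (if PySem.Set.contains found k1 || PySem.Set.contains found k2 || PySem.Set.contains found k3 then
          PySem.Set.update s T else s) rest := by
  simp only [List.foldl_cons]
  rw [pv_if3]

-- Set.update by the literal tag lists is a chain of adds (definitional)
theorem pv_upd1 (s : PySem.Set String) (a : String) :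
    PySem.Set.update s [a] = PySem.Set.add s a := rfl

theorem pv_upd2 (s : PySem.Set String) (a b : String) :
    PySem.Set.update s [a, b] = PySem.Set.add (PySem.Set.add s a) b := rfl

-- ===== VERDICT (by name: the statement is the Claim_ definition above) =====
set_option maxHeartbeats 2000000 in
theorem infer_styles_from_name_spec : Claim_equal_infer_styles_from_name := by
  intro name _
  unfold Spec_infer_styles_from_name infer_styles_from_name infer_styles_from_name_alt
  rw [show pvTags.items =
    [("ARROW", ["arrow"]), ("TRIANGLE", ["triangle"]),
     ("BLOCK", ["block"]), ("QUADRANT", ["block"]),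
     ("BOX", ["line", "connector"]), ("LINE", ["line", "connector"]),
     ("CIRCLE", ["circle"]), ("CIRCLED", ["circle"]),
     ("SQUARE", ["square"]), ("DIAMOND", ["diamond"]),
     ("CURVED", ["curved", "organic"]), ("ARC", ["curved", "organic"]), ("ROUNDED", ["curved", "organic"]),
     ("DOUBLE", ["double"]), ("DASHED", ["dashed"]), ("DOTTED", ["dashed"]),
     ("GEOMETRIC", ["geometric"]), ("MATHEMATICAL", ["geometric"])] from rfl]
  rw [pv_group1, pv_group1, pv_group2, pv_group2, pv_group2, pv_group1, pv_group1,
    pv_group3, pv_group1, pv_group2, pv_group2, List.foldl_nil]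
  rw [pv_found_key _ "ARROW" (by decide) (by decide) (by decide),
    pv_found_key _ "TRIANGLE" (by decide) (by decide) (by decide),
    pv_found_key _ "BLOCK" (by decide) (by decide) (by decide),
    pv_found_key _ "QUADRANT" (by decide) (by decide) (by decide),
    pv_found_key _ "BOX" (by decide) (by decide) (by decide),
    pv_found_key _ "LINE" (by decide) (by decide) (by decide),
    pv_found_key _ "CIRCLE" (by decide) (by decide) (by decide),
    pv_found_key _ "CIRCLED" (by decide) (by decide) (by decide),
    pv_found_key _ "SQUARE" (by decide) (by decide) (by decide),
    pv_found_key _ "DIAMOND" (by decide) (by decide) (by decide),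
    pv_found_key _ "CURVED" (by decide) (by decide) (by decide),
    pv_found_key _ "ARC" (by decide) (by decide) (by decide),
    pv_found_key _ "ROUNDED" (by decide) (by decide) (by decide),
    pv_found_key _ "DOUBLE" (by decide) (by decide) (by decide),
    pv_found_key _ "DASHED" (by decide) (by decide) (by decide),
    pv_found_key _ "DOTTED" (by decide) (by decide) (by decide),
    pv_found_key _ "GEOMETRIC" (by decide) (by decide) (by decide),
    pv_found_key _ "MATHEMATICAL" (by decide) (by decide) (by decide)]
  simp only [pv_upd1, pv_upd2, List.any_cons, List.any_nil, Bool.or_false]
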